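-- pv_equiv track=rewrite | github.com/Dorijan-Cirkveni/LeetCode | code/1k/1803.py | groupBelow
-- ===== SOURCE A (Python) =====
-- def calculateThreshold(below: int, power: int):
--     rem = (below >> power) + 1
--     return rem << power
--
-- def calculateMask(power: int):
--     return (1 << power) - 1
--
-- def groupBelow(nums: list[int], maxval: int):
--     power = maxval.bit_length()
--     mask = calculateMask(power)
--     threshold = 0
--     nums.sort(reverse=True)
--     curgroup = []
--     groups = []
--     while nums:
--         cur = nums.pop()
--         if cur >= threshold:
--             curgroup = []
--             groups.append(curgroup)
--             threshold = calculateThreshold(cur, power)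
--         curgroup.append(cur & mask)
--     return groups
-- ===== SOURCE B (Python) =====
-- def groupBelow(nums: list[int], maxval: int):
--     # Bucket low bits by high bits instead of global sort + threshold scan.
--     # Like A, it empties `nums`; values below the initial threshold 0 (negatives)
--     # never open a group, so only nonnegative values are bucketed.
--     power = maxval.bit_length()
--     mask = (1 << power) - 1
--     buckets = {}
--     while nums:
--         v = nums.pop()
--         if v >= 0:
--             buckets.setdefault(v >> power, []).append(v & mask)
--     return [sorted(buckets[h]) for h in sorted(buckets)]
-- ===== Notes on version B (the rewrite author's own statement) =====
-- stated objective: alternative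
-- what changed: Replaces the global descending sort + pop/threshold scan with a single hash-bucketing pass (low bits appended under the high-bits key) followed by iterating the sorted keys and sorting each bucket.
import Mathlib
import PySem

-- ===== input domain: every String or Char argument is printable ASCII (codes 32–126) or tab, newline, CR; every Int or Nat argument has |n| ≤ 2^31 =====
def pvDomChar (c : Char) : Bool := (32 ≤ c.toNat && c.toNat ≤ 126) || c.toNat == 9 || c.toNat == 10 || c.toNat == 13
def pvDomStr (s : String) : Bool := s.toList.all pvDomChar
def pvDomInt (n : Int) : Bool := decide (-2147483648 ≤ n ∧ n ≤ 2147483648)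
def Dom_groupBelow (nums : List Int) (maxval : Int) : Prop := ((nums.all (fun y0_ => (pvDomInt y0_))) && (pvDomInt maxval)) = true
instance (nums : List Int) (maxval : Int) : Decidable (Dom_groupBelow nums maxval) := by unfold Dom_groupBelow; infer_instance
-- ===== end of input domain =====

-- B replaces A's global descending sort + pop/threshold scan by one hash-bucketing pass
-- (low bits keyed by high bits) followed by a sorted-keys pass (objective: alternative).
-- Both Pythons empty `nums` in place; the equivalence proved here is about the return value.

-- ===== PORT A =====
def calculateThreshold (below : Int) (power : Nat) : Int :=
  ((below >>> power) + 1) <<< power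

def calculateMask (power : Nat) : Int :=
  ((1 : Int) <<< power) - 1

-- `while nums: cur = nums.pop()` — pops from the END of the (descending-sorted) list.
-- Python's `curgroup` is aliased inside `groups`; modelled by carrying the open group
-- `cur` separately with a `started` flag and attaching it when closed / at the end.
def groupBelowLoop (rest : List Int) (power : Nat) (mask threshold : Int)
    (cur : List Int) (started : Bool) (groups : List (List Int)) : List (List Int) :=
  if hne : rest = [] then
    (if started then groups ++ [cur] else groups)
  else
    let c := rest.getLast hne
    if c ≥ threshold then
      groupBelowLoop rest.dropLast power mask (calculateThreshold c power)
        [PySem.Int.band c mask] true (if started then groups ++ [cur] else groups)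
    else
      groupBelowLoop rest.dropLast power mask threshold
        (cur ++ [PySem.Int.band c mask]) started groups
  termination_by rest.length
  decreasing_by
    all_goals
      simp only [List.length_dropLast]
      have : rest.length ≠ 0 := by simpa using List.length_pos_of_ne_nil hne |>.ne'
      omega

def groupBelow (nums : List Int) (maxval : Int) : List (List Int) :=
  let power := PySem.Int.bitLength maxval
  let mask := calculateMask power
  groupBelowLoop (PySem.List.sorted nums (fun x => x) true) power mask 0 [] false []

-- ===== PORT B =====
def groupBelow_alt (nums : List Int) (maxval : Int) : List (List Int) :=
  let power := PySem.Int.bitLength maxval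
  let mask := ((1 : Int) <<< power) - 1
  -- while nums: v = nums.pop() — iterates nums from the end
  let buckets : PySem.Dict Int (List Int) :=
    nums.reverse.foldl
      (fun d (v : Int) =>
        if v ≥ 0 then d.modify (v >>> power) [] (fun l => l ++ [PySem.Int.band v mask])
        else d)
      PySem.Dict.empty
  (PySem.List.sorted buckets.keys (fun k => k) false).map
    (fun h => PySem.List.sorted (buckets.getD h []) (fun x => x) false)

-- ===== PRECONDITION & SPEC =====
def Spec_groupBelow (nums : List Int) (maxval : Int) (out : List (List Int)) : Prop := out = groupBelow_alt nums maxval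
instance (nums : List Int) (maxval : Int) (out : List (List Int)) : Decidable (Spec_groupBelow nums maxval out) := by unfold Spec_groupBelow; infer_instance

-- ===== CLAIM (what is proved, stated in full; the proofs are below) =====
def Claim_equal_groupBelow : Prop := ∀ (nums : List Int) (maxval : Int), Dom_groupBelow nums maxval → Spec_groupBelow nums maxval (groupBelow nums maxval)

-- ===== LEMMAS AND PROOFS =====

-- proof-only abbreviations
def keyf (p : Nat) (v : Int) : Int := v >>> p
def maskf (p : Nat) (v : Int) : Int := PySem.Int.band v (((1 : Int) <<< p) - 1)
def chunk (p : Nat) (S : List Int) (h : Int) : List Int :=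
  (S.filter (fun v => keyf p v == h)).map (maskf p)
def keysOf (p : Nat) (S : List Int) : List Int :=
  PySem.List.dedup (S.map (keyf p))
def canon (p : Nat) (S : List Int) : List (List Int) :=
  (keysOf p S).map (chunk p S)

-- structural (front-to-back) version of A's pop loop
def ascLoop (S : List Int) (power : Nat) (mask threshold : Int)
    (cur : List Int) (started : Bool) (groups : List (List Int)) : List (List Int) :=
  match S with
  | [] => if started then groups ++ [cur] else groups
  | c :: rest =>
    if c ≥ threshold then
      ascLoop rest power mask (calculateThreshold c power)
        [PySem.Int.band c mask] true (if started then groups ++ [cur] else groups)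
    else
      ascLoop rest power mask threshold (cur ++ [PySem.Int.band c mask]) started groups

theorem groupBelowLoop_eq_ascLoop (rest : List Int) (p : Nat) (m t : Int)
    (cur : List Int) (st : Bool) (gs : List (List Int)) :
    groupBelowLoop rest p m t cur st gs = ascLoop rest.reverse p m t cur st gs := by
  induction rest using List.reverseRecOn generalizing t cur st gs with
  | nil => rw [groupBelowLoop]; simp [ascLoop]
  | append_singleton l c ih =>
    rw [groupBelowLoop]
    have hne : l ++ [c] ≠ [] := by simp
    rw [dif_neg hne]
    simp only [List.getLast_append_singleton, List.dropLast_concat,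
      List.reverse_append, List.reverse_cons, List.reverse_nil, List.nil_append,
      List.cons_append, ascLoop]
    split_ifs with h <;> exact ih ..

theorem sorted_rev_reverse (nums : List Int) :
    (PySem.List.sorted nums (fun x => x) true).reverse
      = PySem.List.sorted nums (fun x => x) false := by
  refine (PySem.List.sorted_id_eq_of_perm_of_pairwise _ _ ?_ ?_).symm
  · exact (List.reverse_perm _).trans (PySem.List.sorted_perm nums (fun x => x) true)
  · exact List.pairwise_reverse.mpr
      (PySem.List.sorted_pairwise_rev nums (fun x => x))

-- before a group is started, `cur` is write-only
theorem ascLoop_cur_irrel (S : List Int) (p : Nat) (m t : Int)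
    (cur cur' : List Int) (gs : List (List Int)) :
    ascLoop S p m t cur false gs = ascLoop S p m t cur' false gs := by
  induction S generalizing t cur cur' gs with
  | nil => rfl
  | cons c rest ih =>
    simp only [ascLoop, Bool.false_eq_true, if_false]
    split_ifs with h
    · rfl
    · exact ih ..

-- on an ascending list the negative prefix is dropped (threshold starts at 0)
theorem ascLoop_drop_neg (S : List Int) (p : Nat) (m : Int)
    (cur : List Int) (gs : List (List Int)) (hs : S.Pairwise (· ≤ ·)) :
    ascLoop S p m 0 cur false gs
      = ascLoop (S.filter (fun v => decide (0 ≤ v))) p m 0 cur false gs := by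
  induction hs generalizing cur with
  | nil => rfl
  | @cons c rest hhead htail ih =>
    by_cases hc : (0 : Int) ≤ c
    · have hrest : rest.filter (fun v => decide (0 ≤ v)) = rest :=
        List.filter_eq_self.mpr (fun v hv => by
          simpa using le_trans hc (hhead v hv))
      simp only [List.filter_cons, hc, decide_true, if_true, hrest]
    · have hcf : decide ((0 : Int) ≤ c) = false := by simpa using hc
      simp only [List.filter_cons, hcf, Bool.false_eq_true, if_false, ascLoop]
      rw [if_neg (by simpa using hc)]
      exact (ih _).trans (ascLoop_cur_irrel ..)

-- arithmetic bridges
theorem thr_iff (c h0 : Int) (p : Nat) :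
    ((h0 + 1) <<< p ≤ c) ↔ (h0 + 1 ≤ keyf p c) := by
  unfold keyf
  rw [Int.shiftRight_eq_div_pow, Int.shiftLeft_eq,
    Int.le_ediv_iff_mul_le (by positivity)]
  push_cast
  rfl

theorem keyf_mono (p : Nat) {v w : Int} (h : v ≤ w) : keyf p v ≤ keyf p w := by
  unfold keyf
  rw [Int.shiftRight_eq_div_pow, Int.shiftRight_eq_div_pow]
  exact Int.ediv_le_ediv (by positivity) h

theorem maskf_eq_mod (p : Nat) {v : Int} (hv : 0 ≤ v) :
    maskf p v = v % (2 : Int) ^ p := by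
  unfold maskf
  have h2 : ((1 : Int) <<< p) - 1 = (((2 ^ p - 1 : Nat) : Int)) := by
    rw [Int.shiftLeft_eq]
    push_cast [Nat.one_le_two_pow]
    ring
  rw [h2, ← Int.toNat_of_nonneg hv, PySem.Int.band_natCast,
    Nat.and_two_pow_sub_one_eq_mod]
  push_cast
  rw [Int.toNat_of_nonneg hv]

theorem decomp (p : Nat) {v : Int} (hv : 0 ≤ v) :
    v = keyf p v * (2 : Int) ^ p + maskf p v := by
  rw [maskf_eq_mod p hv]
  unfold keyf
  rw [Int.shiftRight_eq_div_pow]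
  push_cast
  have h := Int.mul_ediv_add_emod v ((2 : Int) ^ p)
  linarith [mul_comm (v / (2 : Int) ^ p) ((2 : Int) ^ p)]

theorem maskf_mono (p : Nat) {v w : Int} (hv : 0 ≤ v) (hw : 0 ≤ w)
    (hle : v ≤ w) (hk : keyf p v = keyf p w) : maskf p v ≤ maskf p w := by
  have d1 := decomp p hv
  have d2 := decomp p hw
  rw [hk] at d1
  linarith

-- PySem.List.dedup peels its head and removes later duplicates of it
theorem set_add_of_mem {s : PySem.Set Int} {a : Int} (h : a ∈ s) : s.add a = s := by
  simp [PySem.Set.add, PySem.Set.contains, h]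

theorem set_add_of_not_mem {s : PySem.Set Int} {a : Int} (h : a ∉ s) : s.add a = s ++ [a] := by
  simp [PySem.Set.add, PySem.Set.contains, h]

theorem foldl_add_skip (l : List Int) : ∀ (s : PySem.Set Int) (a : Int), a ∈ s →
    List.foldl PySem.Set.add s l = List.foldl PySem.Set.add s (l.filter (fun x => x != a)) := by
  induction l with
  | nil => intro s a _; rfl
  | cons x l ih =>
    intro s a ha
    by_cases hx : x = a
    · subst hx
      simp only [List.filter_cons, bne_self_eq_false, Bool.false_eq_true, if_false,
        List.foldl_cons, set_add_of_mem ha]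
      exact ih s x ha
    · have : (x != a) = true := by simpa using hx
      simp only [List.filter_cons, this, if_true, List.foldl_cons]
      exact ih (s.add x) a (by by_cases hm : x ∈ s <;>
        simp [hm, ha])

theorem foldl_add_cons_out (l : List Int) : ∀ (s : PySem.Set Int) (a : Int),
    (∀ x ∈ l, x ≠ a) →
    List.foldl PySem.Set.add (a :: s) l = a :: List.foldl PySem.Set.add s l := by
  induction l with
  | nil => intro s a _; rfl
  | cons x l ih =>
    intro s a hne
    have hxa : x ≠ a := hne x (by simp)
    have hstep : PySem.Set.add (a :: s) x = a :: PySem.Set.add s x := by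
      by_cases hm : x ∈ s
      · rw [set_add_of_mem hm, set_add_of_mem (by simp [hm])]
      · rw [set_add_of_not_mem hm, set_add_of_not_mem (by simp [hm, hxa])]
        rfl
    simp only [List.foldl_cons, hstep]
    exact ih _ a (fun y hy => hne y (by simp [hy]))

theorem dedup_cons (a : Int) (l : List Int) :
    PySem.List.dedup (a :: l) = a :: PySem.List.dedup (l.filter (fun x => x != a)) := by
  rw [PySem.List.dedup_eq_ofList, PySem.List.dedup_eq_ofList,
    PySem.Set.ofList_eq_foldl, PySem.Set.ofList_eq_foldl]
  have h0 : PySem.Set.add ([] : PySem.Set Int) a = [a] := by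
    rw [set_add_of_not_mem (by simp)]; rfl
  rw [List.foldl_cons, h0, foldl_add_skip _ _ a (by simp)]
  exact foldl_add_cons_out _ _ a (fun x hx => by
    rcases List.mem_filter.mp hx with ⟨_, hb⟩; simpa using hb)

theorem pairwise_lt_dedup_aux : ∀ (n : Nat) (l : List Int), l.length ≤ n →
    l.Pairwise (· ≤ ·) → (PySem.List.dedup l).Pairwise (· < ·) := by
  intro n
  induction n with
  | zero =>
    intro l hl _
    have : l = [] := List.length_eq_zero_iff.mp (Nat.le_zero.mp hl)
    subst this
    simp [PySem.List.dedup_eq_ofList, PySem.Set.ofList_eq_foldl]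
  | succ n ih =>
    intro l hl hp
    cases l with
    | nil => simp [PySem.List.dedup_eq_ofList, PySem.Set.ofList_eq_foldl]
    | cons a t =>
      rw [dedup_cons]
      rcases List.pairwise_cons.mp hp with ⟨hhead, htail⟩
      refine List.pairwise_cons.mpr ⟨?_, ?_⟩
      · intro b hb
        have hb' := (PySem.List.mem_dedup _ _).mp hb
        rcases List.mem_filter.mp hb' with ⟨hbt, hbne⟩
        have hba : b ≠ a := by simpa using hbne
        exact lt_of_le_of_ne (hhead b hbt) hba.symm
      · exact ih _ (le_trans (List.length_filter_le _ _) (by simpa using hl))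
          (htail.filter _)

theorem pairwise_lt_dedup (l : List Int) (h : l.Pairwise (· ≤ ·)) :
    (PySem.List.dedup l).Pairwise (· < ·) :=
  pairwise_lt_dedup_aux l.length l le_rfl h

theorem canon_cons (p : Nat) (c : Int) (T : List Int) :
    canon p (c :: T)
      = (maskf p c :: chunk p T (keyf p c))
        :: (keysOf p (T.filter (fun v => keyf p v != keyf p c))).map (chunk p T) := by
  unfold canon keysOf
  rw [List.map_cons, dedup_cons, List.filter_map, List.map_cons]
  congr 1
  · unfold chunk
    rw [List.filter_cons]
    simp only [beq_self_eq_true, if_true, List.map_cons]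
  · simp only [Function.comp_def]
    apply List.map_congr_left
    intro h hh
    have hh' := (PySem.List.mem_dedup _ _).mp hh
    rcases List.mem_map.mp hh' with ⟨w, hw, rfl⟩
    rcases List.mem_filter.mp hw with ⟨_, hne⟩
    have hne' : (keyf p c == keyf p w) = false :=
      beq_eq_false_iff_ne.mpr (Ne.symm (by simpa using hne))
    unfold chunk
    rw [List.filter_cons]
    simp only [hne', Bool.false_eq_true, if_false]

-- the open-group invariant of A's scan over an ascending nonnegative list
theorem ascLoop_go (p : Nat) (S : List Int) (h0 : Int) (cur : List Int)
    (gs : List (List Int)) (hs : S.Pairwise (· ≤ ·)) (hnn : ∀ v ∈ S, 0 ≤ v)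
    (hk : ∀ v ∈ S, h0 ≤ keyf p v) :
    ascLoop S p (calculateMask p) ((h0 + 1) <<< p) cur true gs
      = gs ++ (cur ++ chunk p S h0)
          :: (keysOf p (S.filter (fun v => keyf p v != h0))).map (chunk p S) := by
  induction S generalizing h0 cur gs with
  | nil =>
    simp [ascLoop, chunk, keysOf, PySem.List.dedup_eq_ofList,
      PySem.Set.ofList_eq_foldl]
  | cons c S' ih =>
    rcases List.pairwise_cons.mp hs with ⟨hcle, htail⟩
    have hc0 : (0 : Int) ≤ c := hnn c (by simp)
    have hkc : h0 ≤ keyf p c := hk c (by simp)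
    have hnn' : ∀ v ∈ S', 0 ≤ v := fun v hv => hnn v (by simp [hv])
    simp only [ascLoop, ge_iff_le, if_true]
    by_cases hge : (h0 + 1) <<< p ≤ c
    · rw [if_pos hge]
      have hkgt : h0 + 1 ≤ keyf p c := (thr_iff c h0 p).mp hge
      have hkeys : ∀ v ∈ S', keyf p c ≤ keyf p v := fun v hv => keyf_mono p (hcle v hv)
      have hthr : calculateThreshold c p = (keyf p c + 1) <<< p := rfl
      have hmask : PySem.Int.band c (calculateMask p) = maskf p c := rfl
      rw [hthr, hmask, ih (keyf p c) [maskf p c] (gs ++ [cur]) htail hnn' hkeys]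
      have hfe : (c :: S').filter (fun v => keyf p v == h0) = [] :=
        List.filter_eq_nil_iff.mpr (by
          intro v hv
          rcases List.mem_cons.mp hv with rfl | hv'
          · simp only [beq_iff_eq]; omega
          · have := keyf_mono p (hcle v hv')
            simp only [beq_iff_eq]; omega)
      have hchunk0 : chunk p (c :: S') h0 = [] := by
        unfold chunk; rw [hfe]; rfl
      have hfilt : (c :: S').filter (fun v => keyf p v != h0) = c :: S' := by
        apply List.filter_eq_self.mpr
        intro v hv
        rcases List.mem_cons.mp hv with rfl | hv'
        · simp only [bne_iff_ne, ne_eq]; omega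
        · have := keyf_mono p (hcle v hv')
          simp only [bne_iff_ne, ne_eq]; omega
      rw [hchunk0, hfilt,
        show (keysOf p (c :: S')).map (chunk p (c :: S')) = canon p (c :: S') from rfl,
        canon_cons]
      simp
    · rw [if_neg hge]
      have hle' : keyf p c ≤ h0 := by
        have hx : ¬ (h0 + 1 ≤ keyf p c) := fun hx => hge ((thr_iff c h0 p).mpr hx)
        omega
      have heq : keyf p c = h0 := le_antisymm hle' hkc
      have hkeys' : ∀ v ∈ S', h0 ≤ keyf p v := fun v hv =>
        heq ▸ keyf_mono p (hcle v hv)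
      have hmask : PySem.Int.band c (calculateMask p) = maskf p c := rfl
      rw [hmask, ih h0 (cur ++ [maskf p c]) gs htail hnn' hkeys']
      have hchunkc : chunk p (c :: S') h0 = maskf p c :: chunk p S' h0 := by
        unfold chunk
        rw [List.filter_cons]
        simp only [heq, beq_self_eq_true, if_true, List.map_cons]
      have hfiltc : (c :: S').filter (fun v => keyf p v != h0)
          = S'.filter (fun v => keyf p v != h0) := by
        rw [List.filter_cons]
        simp only [heq, bne_self_eq_false, Bool.false_eq_true, if_false]
      have hmapc : (keysOf p (S'.filter (fun v => keyf p v != h0))).map (chunk p (c :: S'))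
          = (keysOf p (S'.filter (fun v => keyf p v != h0))).map (chunk p S') := by
        apply List.map_congr_left
        intro h hh
        have hh' := (PySem.List.mem_dedup _ _).mp hh
        rcases List.mem_map.mp hh' with ⟨w, hw, rfl⟩
        rcases List.mem_filter.mp hw with ⟨_, hne⟩
        have hne' : (keyf p c == keyf p w) = false := by
          rw [heq]
          exact beq_eq_false_iff_ne.mpr (Ne.symm (by simpa using hne))
        unfold chunk
        rw [List.filter_cons]
        simp only [hne', Bool.false_eq_true, if_false]
      rw [hchunkc, hfiltc, hmapc]
      simp

theorem ascLoop_top (p : Nat) (S : List Int) (hs : S.Pairwise (· ≤ ·))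
    (hnn : ∀ v ∈ S, 0 ≤ v) :
    ascLoop S p (calculateMask p) 0 [] false [] = canon p S := by
  cases S with
  | nil => rfl
  | cons c T =>
    rcases List.pairwise_cons.mp hs with ⟨hcle, htail⟩
    have hnn' : ∀ v ∈ T, 0 ≤ v := fun v hv => hnn v (by simp [hv])
    simp only [ascLoop, Bool.false_eq_true, if_false]
    rw [if_pos (show c ≥ (0 : Int) from hnn c (by simp))]
    have hthr : calculateThreshold c p = (keyf p c + 1) <<< p := rfl
    have hmask : PySem.Int.band c (calculateMask p) = maskf p c := rfl
    rw [hthr, hmask,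
      ascLoop_go p T (keyf p c) [maskf p c] [] htail hnn'
        (fun v hv => keyf_mono p (hcle v hv)),
      canon_cons]
    simp

theorem groupBelow_eq_canon (nums : List Int) (maxval : Int) :
    groupBelow nums maxval
      = canon (PySem.Int.bitLength maxval)
          ((PySem.List.sorted nums (fun x => x) false).filter (fun v => decide (0 ≤ v))) := by
  unfold groupBelow
  rw [groupBelowLoop_eq_ascLoop, sorted_rev_reverse,
    ascLoop_drop_neg _ _ _ _ _ (by simpa using PySem.List.sorted_pairwise nums (fun x => x))]
  exact ascLoop_top _ _
    ((by simpa using PySem.List.sorted_pairwise nums (fun x => x) : List.Pairwise (· ≤ ·) _).filter _)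
    (fun v hv => by simpa using (List.mem_filter.mp hv).2)

theorem foldl_if_filter (g : PySem.Dict Int (List Int) → Int → PySem.Dict Int (List Int)) :
    ∀ (l : List Int) (d : PySem.Dict Int (List Int)),
    l.foldl (fun d v => if v ≥ 0 then g d v else d) d
      = (l.filter (fun v => decide (0 ≤ v))).foldl g d := by
  intro l
  induction l with
  | nil => intro d; rfl
  | cons x l ih =>
    intro d
    by_cases hx : (0 : Int) ≤ x
    · rw [List.filter_cons]
      simp only [hx, decide_true, if_true, List.foldl_cons]
      exact ih _
    · rw [List.filter_cons]
      simp only [hx, decide_false, Bool.false_eq_true, if_false, List.foldl_cons]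
      exact ih _

theorem altBody_eq_canon (p : Nat) (nums : List Int) :
    (PySem.List.sorted
        ((nums.reverse.foldl
            (fun d (v : Int) =>
              if v ≥ 0 then d.modify (v >>> p) [] (fun l => l ++ [PySem.Int.band v (((1 : Int) <<< p) - 1)])
              else d)
            (PySem.Dict.empty : PySem.Dict Int (List Int))).keys) (fun k => k) false).map
      (fun h => PySem.List.sorted
        ((nums.reverse.foldl
            (fun d (v : Int) =>
              if v ≥ 0 then d.modify (v >>> p) [] (fun l => l ++ [PySem.Int.band v (((1 : Int) <<< p) - 1)])
              else d)
            (PySem.Dict.empty : PySem.Dict Int (List Int))).getD h []) (fun x => x) false)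
    = canon p ((PySem.List.sorted nums (fun x => x) false).filter (fun v => decide (0 ≤ v))) := by
  have hfold := foldl_if_filter
    (fun d (v : Int) => PySem.Dict.modify d (keyf p v) [] (fun l => l ++ [maskf p v]))
    nums.reverse PySem.Dict.empty
  set L := nums.reverse.filter (fun v => decide (0 ≤ v)) with hL
  set Sp := (PySem.List.sorted nums (fun x => x) false).filter (fun v => decide (0 ≤ v)) with hSp
  have hSpPw : Sp.Pairwise (· ≤ ·) :=
    ((by simpa using PySem.List.sorted_pairwise nums (fun x => x) :
      List.Pairwise (· ≤ ·) (PySem.List.sorted nums (fun x => x) false)).filter _)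
  have hSpNn : ∀ v ∈ Sp, 0 ≤ v := fun v hv => by
    simpa using (List.mem_filter.mp hv).2
  have hLperm : L.Perm Sp :=
    ((List.reverse_perm nums).filter _).trans
      (((PySem.List.sorted_perm nums (fun x => x) false).filter _).symm)
  rw [show (fun d (v : Int) =>
        if v ≥ 0 then PySem.Dict.modify d (v >>> p) [] (fun l => l ++ [PySem.Int.band v (((1 : Int) <<< p) - 1)])
        else d)
      = (fun d (v : Int) =>
        if v ≥ 0 then PySem.Dict.modify d (keyf p v) [] (fun l => l ++ [maskf p v]) else d) from rfl,
    hfold]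
  have hkeys : (L.foldl (fun d v => PySem.Dict.modify d (keyf p v) [] (fun l => l ++ [maskf p v]))
      PySem.Dict.empty).keys = PySem.Set.ofList (L.map (keyf p)) := by
    rw [PySem.Dict.keys_foldl_modify_key L (keyf p) []
        (fun _ v => fun l => l ++ [maskf p v]) PySem.Dict.empty,
      PySem.Dict.keys_empty, PySem.Set.update_map_eq_foldl_add,
      PySem.Set.ofList_eq_foldl, List.foldl_map]
  have hgetD : ∀ h : Int,
      (L.foldl (fun d v => PySem.Dict.modify d (keyf p v) [] (fun l => l ++ [maskf p v]))
        PySem.Dict.empty).getD h []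
      = (L.filter (fun v => keyf p v == h)).map (maskf p) := by
    intro h
    have h1 : L.foldl (fun d v => PySem.Dict.modify d (keyf p v) [] (fun l => l ++ [maskf p v]))
        PySem.Dict.empty
        = (L.map (fun v => (keyf p v, maskf p v))).foldl
            (fun d q => PySem.Dict.modify d q.1 [] (fun l => l ++ [q.2])) PySem.Dict.empty := by
      rw [List.foldl_map]
    rw [h1, PySem.Dict.getD_foldl_modify_append, PySem.Dict.getD_empty, List.nil_append,
      List.filter_map, List.map_map]
    rfl
  have hsortkeys : PySem.List.sorted (PySem.Set.ofList (L.map (keyf p))) (fun k => k) false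
      = keysOf p Sp := by
    refine PySem.List.sorted_eq_of_perm_of_pairwise_lt _ _ (fun x => x) ?_ ?_
    · refine (List.perm_ext_iff_of_nodup (PySem.List.nodup_dedup _)
        (PySem.Set.nodup_ofList _)).mpr ?_
      intro a
      rw [PySem.List.mem_dedup, PySem.Set.mem_ofList]
      constructor
      · rintro ha
        rcases List.mem_map.mp ha with ⟨v, hv, rfl⟩
        exact List.mem_map.mpr ⟨v, (hLperm.mem_iff).mpr hv, rfl⟩
      · rintro ha
        rcases List.mem_map.mp ha with ⟨v, hv, rfl⟩
        exact List.mem_map.mpr ⟨v, (hLperm.mem_iff).mp hv, rfl⟩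
    · exact pairwise_lt_dedup _
        (List.pairwise_map.mpr (hSpPw.imp (fun h => keyf_mono p h)))
  have hsortbucket : ∀ h : Int,
      PySem.List.sorted ((L.filter (fun v => keyf p v == h)).map (maskf p)) (fun x => x) false
        = chunk p Sp h := by
    intro h
    refine PySem.List.sorted_id_eq_of_perm_of_pairwise _ _ ?_ ?_
    · exact (((hLperm.filter _).map _).symm :
        (chunk p Sp h).Perm ((L.filter (fun v => keyf p v == h)).map (maskf p)))
    · refine List.pairwise_map.mpr ?_
      refine (hSpPw.filter _).imp_of_mem ?_
      intro a b ha hb hab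
      rcases List.mem_filter.mp ha with ⟨haS, hak⟩
      rcases List.mem_filter.mp hb with ⟨hbS, hbk⟩
      exact maskf_mono p (hSpNn a haS) (hSpNn b hbS) hab
        ((beq_iff_eq.mp hak).trans (beq_iff_eq.mp hbk).symm)
  rw [hkeys, hsortkeys]
  unfold canon
  apply List.map_congr_left
  intro h _
  rw [hgetD h]
  exact hsortbucket h

theorem groupBelow_alt_eq_canon (nums : List Int) (maxval : Int) :
    groupBelow_alt nums maxval
      = canon (PySem.Int.bitLength maxval)
          ((PySem.List.sorted nums (fun x => x) false).filter (fun v => decide (0 ≤ v))) := by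
  unfold groupBelow_alt
  exact altBody_eq_canon (PySem.Int.bitLength maxval) nums

-- ===== VERDICT (by name: the statement is the Claim_ definition above) =====
theorem groupBelow_spec : Claim_equal_groupBelow := by
  intro nums maxval _
  unfold Spec_groupBelow
  rw [groupBelow_eq_canon, groupBelow_alt_eq_canon]
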